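-- pv_equiv track=rewrite | github.com/qiujames/ICPC2022_DoogerV4_UW | problemFreal.py | didWin
-- ===== SOURCE A (Python) =====
-- def didWin(picks, us):
--
--     if(us > max(picks)):
--         return True
--     counts = {}
--     for elem in picks:
--         if elem not in counts:
--             counts[elem] = 0
--         counts[elem] += 1
--     max_num = -1
--     unique = False
--     for elem in counts:
--         if counts[elem] == 1 and elem > max_num:
--             max_num = elem
--             unique = True
--     if unique:
--         if (max_num > us):
--             return False
--
--     if (len(counts) == 1):
--         return True
--
--     for elem in counts:
--         if elem == us:
--             return False
--     return True
-- ===== SOURCE B (Python) =====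
-- def _largest_unique(s):
--     # s sorted descending; largest value occurring exactly once, or None
--     if not s:
--         return None
--     head, rest = s[0], s[1:]
--     run = 0
--     while run < len(rest) and rest[run] == head:
--         run += 1
--     if run == 0:
--         return head
--     return _largest_unique(rest[run:])
--
--
-- def didWin(picks, us):
--     s = sorted(picks, reverse=True)
--     if us > s[0]:
--         return True
--     m = _largest_unique(s)
--     if m is not None and m > us:
--         return False
--     if s[0] == s[-1]:
--         return True
--     return us not in s
-- ===== Notes on version B (the rewrite author's own statement) =====
-- stated objective: simpler
-- what changed: B replaces A's counts dict and its two full dict scans by one descending sort followed by an adjacency-based scan for the largest value occurring exactly once, with head/last of the sorted list giving the max and the all-equal test; Pre_ excludes only the empty list, on which A raises ValueError.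
-- intended difference: When every pick occurring exactly once is <= -1 and the largest such unique pick exceeds us (and us is not among the picks, or all picks are equal), A's max_num=-1 sentinel never marks it unique so A returns True, while B returns False because an opponent holds a unique pick beating us, which is the intended value. — e.g. on didWin([-1, -3, -3], -2): A returns true, B returns false
import Mathlib
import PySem

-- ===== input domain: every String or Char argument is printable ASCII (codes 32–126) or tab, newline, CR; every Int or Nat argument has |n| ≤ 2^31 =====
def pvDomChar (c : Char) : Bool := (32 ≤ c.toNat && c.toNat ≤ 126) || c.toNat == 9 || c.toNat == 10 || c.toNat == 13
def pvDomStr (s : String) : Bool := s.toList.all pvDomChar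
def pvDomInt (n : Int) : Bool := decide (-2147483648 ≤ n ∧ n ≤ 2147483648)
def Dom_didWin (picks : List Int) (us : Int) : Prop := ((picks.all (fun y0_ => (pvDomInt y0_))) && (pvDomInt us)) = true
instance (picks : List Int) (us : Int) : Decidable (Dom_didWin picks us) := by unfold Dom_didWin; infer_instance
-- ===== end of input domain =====

-- B replaces A's counts dict and its two dict scans by one descending sort plus an adjacency scan (objective: simpler).

-- ===== PORT A =====
def didWin (picks : List Int) (us : Int) : Bool :=
  match PySem.List.max? picks (fun x => x) with
  | none => false  -- max([]) raises ValueError: empty picks is excluded by Pre_didWin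
  | some mx =>
    if us > mx then true
    else
      let counts : PySem.Dict Int Int := picks.foldl
        (fun d e =>
          let d' := if d.contains e then d else d.insert e 0
          d'.insert e (d'.getD e 0 + 1)) PySem.Dict.empty
      let r := counts.keys.foldl
        (fun (p : Int × Bool) e =>
          if counts.getD e 0 == 1 && decide (p.1 < e) then (e, true) else p)
        ((-1 : Int), false)
      if r.2 && decide (us < r.1) then false
      else if counts.size == 1 then true
      else if counts.keys.any (fun e => e == us) then false
      else true

-- ===== PORT B =====
-- helper of Source B: s sorted descending; largest value occurring exactly once, or none
def largestUnique : List Int → Option Int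
  | [] => none
  | h :: rest =>
    let run := (rest.takeWhile (fun x => x == h)).length
    if run = 0 then some h
    else largestUnique (rest.drop run)
termination_by s => s.length
decreasing_by simp

def didWin_alt (picks : List Int) (us : Int) : Bool :=
  let s := PySem.List.sorted picks (fun x => x) true
  if us > PySem.List.pyGetD s 0 0 then true  -- s[0] raises IndexError on []: excluded by Pre_didWin
  else if (match largestUnique s with
           | some m => decide (us < m)
           | none => false) then false
  else if PySem.List.pyGetD s 0 0 == PySem.List.pyGetD s (-1) 0 then true
  else !(s.contains us)

-- ===== PRECONDITION & SPEC =====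
-- Pre_ excludes only the empty list, on which A raises ValueError (max of empty sequence).
def Pre_didWin (picks : List Int) (us : Int) : Prop := picks ≠ []
instance (picks : List Int) (us : Int) : Decidable (Pre_didWin picks us) := by unfold Pre_didWin; infer_instance
def pvWitness_didWin : List Int × Int := ([3, 1, 3, 2], 2)

-- When every pick occurring exactly once is ≤ -1 and the largest such unique pick exceeds us
-- (and us is not among the picks, or all picks are equal), A's max_num = -1 sentinel never marks
-- it unique so A returns True, while B returns False because an opponent holds a unique pick
-- beating us, which is the intended value.
def D_didWin (picks : List Int) (us : Int) : Prop :=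
  (∃ m ∈ picks, picks.count m = 1 ∧ us < m) ∧
  (∀ e ∈ picks, picks.count e = 1 → e ≤ -1) ∧
  (us ∉ picks ∨ ∀ a ∈ picks, ∀ b ∈ picks, a = b)
instance (picks : List Int) (us : Int) : Decidable (D_didWin picks us) := by unfold D_didWin; infer_instance

def Spec_didWin (picks : List Int) (us : Int) (out : Bool) : Prop := ¬ D_didWin picks us → out = didWin_alt picks us
instance (picks : List Int) (us : Int) (out : Bool) : Decidable (Spec_didWin picks us out) := by unfold Spec_didWin; infer_instance

def pvDiffWitness_didWin : List Int × Int := ([-1, -3, -3], -2)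
def pvDiffWitnessOut_didWin : Bool × Bool := (true, false)

-- ===== CLAIM (what is proved, stated in full; the proofs are below) =====
def Claim_unchanged_didWin : Prop := ∀ (picks : List Int) (us : Int), Dom_didWin picks us → Pre_didWin picks us → Spec_didWin picks us (didWin picks us)
def Claim_changed_didWin : Prop := Dom_didWin (pvDiffWitness_didWin.1) (pvDiffWitness_didWin.2) ∧ Pre_didWin (pvDiffWitness_didWin.1) (pvDiffWitness_didWin.2) ∧ D_didWin (pvDiffWitness_didWin.1) (pvDiffWitness_didWin.2) ∧ didWin (pvDiffWitness_didWin.1) (pvDiffWitness_didWin.2) = pvDiffWitnessOut_didWin.1 ∧ didWin_alt (pvDiffWitness_didWin.1) (pvDiffWitness_didWin.2) = pvDiffWitnessOut_didWin.2 ∧ pvDiffWitnessOut_didWin.1 ≠ pvDiffWitnessOut_didWin.2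
def Claim_exact_didWin : Prop := ∀ (picks : List Int) (us : Int), Dom_didWin picks us → Pre_didWin picks us → D_didWin picks us → didWin picks us ≠ didWin_alt picks us

-- ===== LEMMAS AND PROOFS =====

theorem countsEq (picks : List Int) :
    picks.foldl
      (fun (d : PySem.Dict Int Int) e =>
        (if d.contains e then d else d.insert e 0).insert e
          ((if d.contains e then d else d.insert e 0).getD e 0 + 1)) PySem.Dict.empty
      = PySem.Dict.counter picks := by
  have hstep : (fun (d : PySem.Dict Int Int) e =>
        (if d.contains e then d else d.insert e 0).insert e
          ((if d.contains e then d else d.insert e 0).getD e 0 + 1))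
      = (fun (d : PySem.Dict Int Int) e => d.insert e (d.getD e 0 + 1)) := by
    funext d e
    by_cases h : d.contains e
    · simp [h]
    · simp only [h, if_false, Bool.false_eq_true]
      rw [PySem.Dict.getD_insert_self, PySem.Dict.insert_insert_self,
        PySem.Dict.getD_of_not_contains d 0 (by simpa using h)]
  rw [hstep, PySem.Dict.foldl_insert_getD_add_one_eq_counter]

theorem foldA (cnt : Int → Int) (us : Int) :
    ∀ (K : List Int) (m : Int) (u : Bool),
      (((K.foldl (fun (p : Int × Bool) e => if cnt e == 1 && decide (p.1 < e) then (e, true) else p) (m, u)).2 &&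
        decide (us < (K.foldl (fun (p : Int × Bool) e => if cnt e == 1 && decide (p.1 < e) then (e, true) else p) (m, u)).1)) = true)
      ↔ ((u = true ∧ us < m) ∨ ∃ e ∈ K, cnt e = 1 ∧ m < e ∧ us < e) := by
  intro K
  induction K with
  | nil => intro m u; simp
  | cons e K ih =>
    intro m u
    simp only [List.foldl_cons]
    by_cases hc : cnt e = 1 ∧ m < e
    · simp only [show (if (cnt e == 1 && decide (m < e)) = true then ((e : Int), true) else (m, u)) = (e, true) from
        if_pos (by simp [hc.1, hc.2])]
      rw [ih e true]
      constructor
      · rintro (⟨-, h⟩ | ⟨e', he', h1, h2, h3⟩)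
        · exact Or.inr ⟨e, by simp, hc.1, hc.2, h⟩
        · exact Or.inr ⟨e', by simp [he'], h1, lt_trans hc.2 h2, h3⟩
      · rintro (⟨hu, hm⟩ | ⟨e', he', h1, h2, h3⟩)
        · exact Or.inl ⟨rfl, lt_trans hm hc.2⟩
        · rcases List.mem_cons.mp he' with rfl | he'
          · exact Or.inl ⟨rfl, h3⟩
          · rcases lt_or_ge e e' with hlt | hle
            · exact Or.inr ⟨e', he', h1, hlt, h3⟩
            · exact Or.inl ⟨rfl, lt_of_lt_of_le h3 hle⟩
    · simp only [show (if (cnt e == 1 && decide (m < e)) = true then ((e : Int), true) else (m, u)) = (m, u) from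
        if_neg (by intro hh; simp at hh; exact absurd ⟨hh.1, hh.2⟩ hc)]
      rw [ih m u]
      constructor
      · rintro (h | ⟨e', he', hs⟩)
        · exact Or.inl h
        · exact Or.inr ⟨e', by simp [he'], hs⟩
      · rintro (h | ⟨e', he', h1, h2, h3⟩)
        · exact Or.inl h
        · rcases List.mem_cons.mp he' with rfl | he'
          · exact absurd ⟨h1, h2⟩ hc
          · exact Or.inr ⟨e', he', h1, h2, h3⟩

-- rest.drop (takeWhile length) = dropWhile
theorem drop_length_takeWhile {α : Type} (p : α → Bool) : ∀ (l : List α),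
    l.drop (l.takeWhile p).length = l.dropWhile p := by
  intro l
  induction l with
  | nil => rfl
  | cons x xs ih =>
    by_cases h : p x
    · simpa [h] using ih
    · simp [List.takeWhile_cons, h]

theorem lu_spec : ∀ (n : Nat) (s : List Int), s.length ≤ n → List.Pairwise (fun a b : Int => b ≤ a) s →
    (∀ m, largestUnique s = some m → m ∈ s ∧ s.count m = 1 ∧ ∀ e ∈ s, s.count e = 1 → e ≤ m) ∧
    (largestUnique s = none → ∀ e ∈ s, s.count e ≠ 1) := by
  intro n
  induction n with
  | zero =>
    intro s hs _
    have : s = [] := List.eq_nil_of_length_eq_zero (Nat.le_zero.mp hs)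
    subst this
    exact ⟨by intro m hm; simp [largestUnique] at hm, by intro _ e he; simp at he⟩
  | succ n ih =>
    intro s hs hp
    match s with
    | [] => exact ⟨by intro m hm; simp [largestUnique] at hm, by intro _ e he; simp at he⟩
    | h :: rest =>
      have hple : ∀ e ∈ rest, e ≤ h := fun e he => (List.pairwise_cons.mp hp).1 e he
      have hprest : List.Pairwise (fun a b : Int => b ≤ a) rest := (List.pairwise_cons.mp hp).2
      set tw := rest.takeWhile (fun x => x == h) with htw
      set dw := rest.dropWhile (fun x => x == h) with hdw
      have hsplit : tw ++ dw = rest := List.takeWhile_append_dropWhile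
      have htwall : ∀ x ∈ tw, x = h := by
        intro x hx
        simpa using List.mem_takeWhile_imp hx
      have hdwp : List.Pairwise (fun a b : Int => b ≤ a) dw :=
        hprest.sublist (List.dropWhile_sublist _)
      have hdwlt : ∀ x ∈ dw, x < h := by
        intro x hx
        rcases hdweq : dw with - | ⟨y, ys⟩
        · rw [hdweq] at hx; simp at hx
        · have hdne : rest.dropWhile (fun x => x == h) ≠ [] := by
            rw [← hdw, hdweq]; simp
          have hy : ¬ (y == h) = true := by
            have := List.head_dropWhile_not (p := fun x => x == h) (l := rest) hdne
            have hhead : (rest.dropWhile (fun x => x == h)).head hdne = y := by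
              simp [← hdw, hdweq]
            rw [hhead] at this; simpa using this
          have hyh : y < h := by
            have hymem : y ∈ rest := (List.dropWhile_sublist _).mem (by rw [← hdw, hdweq]; simp)
            have := hple y hymem
            simp at hy; omega
          rw [hdweq] at hx
          rcases List.mem_cons.mp hx with rfl | hx
          · exact hyh
          · have hxy : x ≤ y := by
              have hp2 := hdwp; rw [hdweq] at hp2
              exact (List.pairwise_cons.mp hp2).1 x hx
            omega
      have hhntw : h ∉ dw := fun hmem => lt_irrefl h (hdwlt h hmem)
      have hcounth : (h :: rest).count h = tw.length + 1 := by
        rw [List.count_cons_self, ← hsplit, List.count_append]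
        rw [List.count_eq_length.mpr (fun b hb => by simp [htwall b hb]),
          List.count_eq_zero.mpr hhntw]
      have hcount_dw : ∀ x ∈ dw, (h :: rest).count x = dw.count x := by
        intro x hx
        have hxh : x ≠ h := ne_of_lt (hdwlt x hx)
        have hxh' : h ≠ x := Ne.symm hxh
        rw [show (h :: rest).count x = rest.count x from by simp [List.count_cons, hxh, hxh']]
        rw [← hsplit, List.count_append, List.count_eq_zero.mpr (fun hmem => hxh (htwall x hmem))]
        omega
      have hdrop : rest.drop tw.length = dw := by
        rw [htw, hdw]; exact drop_length_takeWhile _ rest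
      by_cases hrun : tw.length = 0
      · -- unique head
        have htw0 : tw = [] := List.eq_nil_of_length_eq_zero hrun
        have hlu : largestUnique (h :: rest) = some h := by
          rw [largestUnique]
          show (if tw.length = 0 then some h else largestUnique (rest.drop tw.length)) = some h
          rw [if_pos hrun]
        refine ⟨?_, ?_⟩
        · intro m hm
          rw [hlu] at hm
          obtain rfl : h = m := by simpa using hm
          refine ⟨List.mem_cons_self, ?_, ?_⟩
          · rw [hcounth, hrun]
          · intro e he _; rcases List.mem_cons.mp he with rfl | he
            · exact le_refl _
            · exact hple e he
        · intro hnone; rw [hlu] at hnone; simp at hnone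
      · -- head repeated: recurse on dw
        have hlu : largestUnique (h :: rest) = largestUnique dw := by
          rw [largestUnique]
          show (if tw.length = 0 then some h else largestUnique (rest.drop tw.length)) = largestUnique dw
          rw [if_neg hrun, hdrop]
        have hlen : dw.length ≤ n := by
          have h1 : dw.length ≤ rest.length := by
            rw [← hsplit]; simp
          have := hs; simp at this; omega
        have IH := ih dw hlen hdwp
        have hch2 : (h :: rest).count h ≠ 1 := by rw [hcounth]; omega
        have hnot1 : ∀ e ∈ h :: rest, (h :: rest).count e = 1 → e ∈ dw := by
          intro e he hce
          rcases List.mem_cons.mp he with rfl | he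
          · exact absurd hce hch2
          · rw [← hsplit] at he
            rcases List.mem_append.mp he with he | he
            · exact absurd (htwall e he ▸ hce) hch2
            · exact he
        refine ⟨?_, ?_⟩
        · intro m hm
          rw [hlu] at hm
          obtain ⟨hmem, hcnt, hmax⟩ := IH.1 m hm
          have hmem' : m ∈ h :: rest := by
            rw [← hsplit]; exact List.mem_cons_of_mem _ (List.mem_append.mpr (Or.inr hmem))
          refine ⟨hmem', by rw [hcount_dw m hmem]; exact hcnt, ?_⟩
          · intro e he hce
            have hedw := hnot1 e he hce
            exact hmax e hedw (by rw [← hcount_dw e hedw]; exact hce)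
        · intro hnone e he hce
          rw [hlu] at hnone
          have hedw := hnot1 e he hce
          exact IH.2 hnone e hedw (by rw [← hcount_dw e hedw]; exact hce)

theorem desc_last_le : ∀ (s : List Int) (hne : s ≠ []), List.Pairwise (fun a b : Int => b ≤ a) s →
    ∀ e ∈ s, s.getLast hne ≤ e := by
  intro s
  induction s with
  | nil => intro hne; simp at hne
  | cons x xs ih =>
    intro hne hp e he
    rcases List.mem_cons.mp he with rfl | he
    · by_cases hxs : xs = []
      · subst hxs; simp
      · rw [List.getLast_cons hxs]
        exact (List.pairwise_cons.mp hp).1 _ (List.getLast_mem hxs)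
    · have hxsne : xs ≠ [] := List.ne_nil_of_mem he
      rw [List.getLast_cons hxsne]
      exact ih hxsne (List.pairwise_cons.mp hp).2 e he
theorem size_eq_keys_length {κ ν : Type} [BEq κ] (d : PySem.Dict κ ν) : d.size = d.keys.length := by
  simp [PySem.Dict.size, PySem.Dict.keys]
theorem nodup_allEq_length_le {α : Type} (l : List α) (a : α) (hn : l.Nodup) (hall : ∀ x ∈ l, x = a) :
    l.length ≤ 1 := by
  match l with
  | [] => simp
  | [x] => simp
  | x :: y :: t =>
    have hx : x = a := hall x (by simp)
    have hy : y = a := hall y (by simp)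
    rw [List.nodup_cons] at hn
    exact absurd (by simp [hx, hy]) hn.1

-- shared branch analysis: A's value and B's value, for picks ≠ []
theorem main_analysis (picks : List Int) (us : Int) (hpre : picks ≠ []) :
    (¬ D_didWin picks us → didWin picks us = didWin_alt picks us) ∧
    (D_didWin picks us → didWin picks us = true ∧ didWin_alt picks us = false) := by
  unfold didWin didWin_alt
  cases hmx : PySem.List.max? picks (fun x => x) with
  | none => exact absurd ((PySem.List.max?_eq_none_iff picks _).mp hmx) hpre
  | some mx =>
    simp only [hmx]
    set s := PySem.List.sorted picks (fun x => x) true with hs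
    have hsne : s ≠ [] := by rw [hs]; simpa [PySem.List.sorted_eq_nil_iff] using hpre
    obtain ⟨h, t, hst⟩ := List.exists_cons_of_ne_nil hsne
    have hpair : List.Pairwise (fun a b : Int => b ≤ a) s := by
      simpa using PySem.List.sorted_pairwise_rev picks (fun x => x)
    have hmems : ∀ x : Int, x ∈ s ↔ x ∈ picks := fun x => PySem.List.mem_sorted picks _ true x
    have hcnts : ∀ x : Int, s.count x = picks.count x :=
      fun x => (PySem.List.sorted_perm picks (fun x => x) true).count_eq x
    have hhead_ge : ∀ y ∈ picks, y ≤ h := by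
      have := PySem.List.key_head_sorted_rev_ge picks (fun x => x) (hs ▸ hst)
      simpa using this
    have hhp : h ∈ picks := (hmems h).mp (by rw [hst]; simp)
    have hmxh : mx = h :=
      le_antisymm (hhead_ge mx (PySem.List.max?_mem hmx)) (by simpa using PySem.List.max?_isMax hmx h hhp)
    have hget0 : PySem.List.pyGetD s 0 0 = h := by rw [hst]; exact PySem.List.pyGetD_zero_cons _ _ _
    rw [hmxh, hget0, countsEq, PySem.Dict.keys_counter, size_eq_keys_length, PySem.Dict.keys_counter]
    simp only [PySem.Dict.getD_counter]
    have hluS := lu_spec s.length s (le_refl _) hpair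
    -- characterize B's test
    have hBiff : (match largestUnique s with
           | some m => decide (us < m)
           | none => false) = true ↔ ∃ e ∈ picks, picks.count e = 1 ∧ us < e := by
      cases hlu : largestUnique s with
      | none =>
        simp only [Bool.false_eq_true, false_iff]
        rintro ⟨e, he, hc, _⟩
        exact hluS.2 hlu e ((hmems e).mpr he) (by rw [hcnts]; exact hc)
      | some m =>
        obtain ⟨hms, hcm, hmax⟩ := hluS.1 m hlu
        simp only [decide_eq_true_eq]
        constructor
        · intro husm
          exact ⟨m, (hmems m).mp hms, by rw [← hcnts]; exact hcm, husm⟩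
        · rintro ⟨e, he, hc, huse⟩
          have : e ≤ m := hmax e ((hmems e).mpr he) (by rw [hcnts]; exact hc)
          omega
    -- characterize A's test
    have hA2 := foldA (fun e => ((picks.count e : Nat) : Int)) us (PySem.Set.ofList picks) (-1) false
    simp only [Bool.false_eq_true, false_and, false_or] at hA2
    set q := (PySem.Set.ofList picks).foldl
        (fun (p : Int × Bool) e => if ((picks.count e : Nat) : Int) == 1 && decide (p.1 < e) then (e, true) else p)
        ((-1 : Int), false) with hqdef
    have hAiff : (q.2 && decide (us < q.1)) = true ↔ ∃ e ∈ picks, picks.count e = 1 ∧ -1 < e ∧ us < e := by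
      rw [hA2]
      constructor
      · rintro ⟨e, he, hc, h1, h2⟩
        exact ⟨e, (PySem.Set.mem_ofList picks e).mp he, by exact_mod_cast hc, h1, h2⟩
      · rintro ⟨e, he, hc, h1, h2⟩
        exact ⟨e, (PySem.Set.mem_ofList picks e).mpr he, by exact_mod_cast hc, h1, h2⟩
    have hgetlast : PySem.List.pyGetD s (-1) 0 = s.getLast hsne := PySem.List.pyGetD_neg_one s 0 hsne
    -- size-1 test ↔ all equal
    have hsize : ((PySem.Set.ofList picks).length == 1) = true ↔ ∀ a ∈ picks, ∀ b ∈ picks, a = b := by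
      constructor
      · intro h1 a ha b hb
        obtain ⟨c, hc⟩ := List.length_eq_one_iff.mp (by simpa using h1)
        have h1' : a = c := by
          have := (PySem.Set.mem_ofList picks a).mpr ha; rw [hc] at this; simpa using this
        have h2' : b = c := by
          have := (PySem.Set.mem_ofList picks b).mpr hb; rw [hc] at this; simpa using this
        rw [h1', h2']
      · intro hall
        have hle : (PySem.Set.ofList picks).length ≤ 1 :=
          nodup_allEq_length_le _ h (PySem.Set.nodup_ofList picks)
            (fun x hx => hall x ((PySem.Set.mem_ofList picks x).mp hx) h hhp)
        have hne' : PySem.Set.ofList picks ≠ [] := by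
          intro habs
          exact absurd ((PySem.Set.mem_ofList picks h).mpr hhp) (by rw [habs]; simp)
        have : 1 ≤ (PySem.Set.ofList picks).length := by
          cases hp' : PySem.Set.ofList picks with
          | nil => exact absurd hp' hne'
          | cons a l => simp
        simp; omega
    -- head = last ↔ all equal
    have hhl : (h == s.getLast hsne) = true ↔ ∀ a ∈ picks, ∀ b ∈ picks, a = b := by
      constructor
      · intro heq a ha b hb
        have hla := desc_last_le s hsne hpair a ((hmems a).mpr ha)
        have hlb := desc_last_le s hsne hpair b ((hmems b).mpr hb)
        have hah := hhead_ge a ha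
        have hbh := hhead_ge b hb
        simp only [beq_iff_eq] at heq
        omega
      · intro hall
        have : s.getLast hsne = h := hall _ ((hmems _).mp (List.getLast_mem hsne)) h hhp
        simp [this]
    -- membership test
    have hmemb : ((PySem.Set.ofList picks).any (fun e => e == us)) = true ↔ us ∈ picks := by
      simp only [List.any_eq_true, beq_iff_eq]
      constructor
      · rintro ⟨e, he, rfl⟩; exact (PySem.Set.mem_ofList picks e).mp he
      · intro hus; exact ⟨us, (PySem.Set.mem_ofList picks us).mpr hus, rfl⟩
    have hcont : s.contains us = true ↔ us ∈ picks := by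
      rw [List.contains_iff_mem]; exact hmems us
    constructor
    · -- agreement outside D
      intro hD
      by_cases hc1 : us > h
      · simp [hc1]
      rw [if_neg hc1, if_neg hc1]
      by_cases hAt : ∃ e ∈ picks, picks.count e = 1 ∧ -1 < e ∧ us < e
      · -- both tests fire
        rw [show (q.2 && decide (us < q.1)) = true from hAiff.mpr hAt,
            show (match largestUnique s with
               | some m => decide (us < m)
               | none => false) = true from hBiff.mpr
              (by obtain ⟨e, he, hc, _, h2⟩ := hAt; exact ⟨e, he, hc, h2⟩)]
        rfl
      · rw [show (q.2 && decide (us < q.1)) = false from Bool.eq_false_iff.mpr (fun hh => hAt (hAiff.mp hh))]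
        by_cases hBt : ∃ e ∈ picks, picks.count e = 1 ∧ us < e
        · -- B fires, A does not: ¬D gives us ∈ picks and not all equal; both return false
          rw [show (match largestUnique s with
               | some m => decide (us < m)
               | none => false) = true from hBiff.mpr hBt]
          have hallneg : ∀ e ∈ picks, picks.count e = 1 → e ≤ -1 := by
            intro e he hc
            by_contra habs
            push_neg at habs
            obtain ⟨e0, he0, hc0, hus0⟩ := hBt
            have he0neg : e0 ≤ -1 := by
              by_contra habs0; push_neg at habs0
              exact hAt ⟨e0, he0, hc0, by omega, hus0⟩
            exact hAt ⟨e, he, hc, by omega, by omega⟩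
          have h3 : ¬ (us ∉ picks ∨ ∀ a ∈ picks, ∀ b ∈ picks, a = b) := fun hh =>
            hD ⟨hBt, hallneg, hh⟩
          have husp : us ∈ picks := by by_contra hc; exact h3 (Or.inl hc)
          have hneq : ¬ ∀ a ∈ picks, ∀ b ∈ picks, a = b := fun hall => h3 (Or.inr hall)
          rw [show ((PySem.Set.ofList picks).length == 1) = false from
              Bool.eq_false_iff.mpr (fun hh => hneq (hsize.mp hh)),
            show ((PySem.Set.ofList picks).any (fun e => e == us)) = true from hmemb.mpr husp]
          rfl
        · -- neither fires: tails agree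
          rw [show (match largestUnique s with
               | some m => decide (us < m)
               | none => false) = false from Bool.eq_false_iff.mpr (fun hh => hBt (hBiff.mp hh))]
          simp only [Bool.false_eq_true, if_false]
          rw [hgetlast]
          by_cases hall : ∀ a ∈ picks, ∀ b ∈ picks, a = b
          · rw [show ((PySem.Set.ofList picks).length == 1) = true from hsize.mpr hall,
                show (h == s.getLast hsne) = true from hhl.mpr hall]
            rfl
          · rw [show ((PySem.Set.ofList picks).length == 1) = false from
                Bool.eq_false_iff.mpr (fun hh => hall (hsize.mp hh)),
              show (h == s.getLast hsne) = false from
                Bool.eq_false_iff.mpr (fun hh => hall (hhl.mp hh))]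
            simp only [Bool.false_eq_true, if_false]
            by_cases hus : us ∈ picks
            · rw [show ((PySem.Set.ofList picks).any (fun e => e == us)) = true from hmemb.mpr hus,
                show s.contains us = true from hcont.mpr hus]
              rfl
            · rw [show ((PySem.Set.ofList picks).any (fun e => e == us)) = false from
                  Bool.eq_false_iff.mpr (fun hh => hus (hmemb.mp hh)),
                show s.contains us = false from Bool.eq_false_iff.mpr (fun hh => hus (hcont.mp hh))]
              rfl
    · -- inside D: A = true, B = false
      rintro ⟨⟨m, hm, hcm, husm⟩, hallneg, hor⟩
      have hc1 : ¬ us > h := by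
        have := hhead_ge m hm
        omega
      rw [if_neg hc1, if_neg hc1]
      have hAf : ¬ ∃ e ∈ picks, picks.count e = 1 ∧ -1 < e ∧ us < e := by
        rintro ⟨e, he, hc, h1, _⟩
        have := hallneg e he hc
        omega
      rw [show (q.2 && decide (us < q.1)) = false from Bool.eq_false_iff.mpr (fun hh => hAf (hAiff.mp hh)),
        show (match largestUnique s with
           | some m => decide (us < m)
           | none => false) = true from hBiff.mpr ⟨m, hm, hcm, husm⟩]
      refine ⟨?_, rfl⟩
      rcases hor with husp | hall
      · by_cases hsz : ∀ a ∈ picks, ∀ b ∈ picks, a = b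
        · rw [show ((PySem.Set.ofList picks).length == 1) = true from hsize.mpr hsz]; rfl
        · rw [show ((PySem.Set.ofList picks).length == 1) = false from
              Bool.eq_false_iff.mpr (fun hh => hsz (hsize.mp hh)),
            show ((PySem.Set.ofList picks).any (fun e => e == us)) = false from
              Bool.eq_false_iff.mpr (fun hh => husp (hmemb.mp hh))]
          rfl
      · rw [show ((PySem.Set.ofList picks).length == 1) = true from hsize.mpr hall]; rfl

-- ===== VERDICT (by name: the statements are the Claim_ definitions above) =====
theorem didWin_spec : Claim_unchanged_didWin := by
  intro picks us _ hpre
  exact fun hD => (main_analysis picks us hpre).1 hD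

theorem didWin_changed : Claim_changed_didWin := by
  unfold Claim_changed_didWin
  refine ⟨by decide, by decide, by decide, by decide, ?_, by decide⟩
  show didWin_alt [-1, -3, -3] (-2) = false
  have hs : PySem.List.sorted [-1, -3, -3] (fun x => x) true = [-1, -3, -3] := by decide
  have hl : largestUnique [-1, -3, -3] = some (-1) := by
    rw [largestUnique, if_pos (by decide)]
  simp only [didWin_alt, hs, hl]
  decide

theorem didWin_tight : Claim_exact_didWin := by
  intro picks us _ hpre hD
  obtain ⟨hA, hB⟩ := (main_analysis picks us hpre).2 hD
  rw [hA, hB]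
  simp
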